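-- pv_equiv track=rewrite | github.com/VeeraSaiJoshik/AllStateJarvis | TUI/solutions/dp/bitmask_dp.py | all_subsets_of_size_k
-- ===== SOURCE A (Python) =====
-- def all_subsets_of_size_k(n, k):
--     """Generate all bitmasks of n bits with exactly k bits set (Gosper's hack)."""
--     if k == 0:
--         yield 0
--         return
--     mask = (1 << k) - 1  # smallest k-bit number
--     limit = 1 << n
--     while mask < limit:
--         yield mask
--         # Gosper's hack: next permutation of bits
--         c = mask & -mask
--         r = mask + c
--         mask = (((r ^ mask) >> 2) // c) | r
-- ===== SOURCE B (Python) =====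
-- def _by_count(n, j):
--     """Ascending list of n-bit masks with exactly j bits set, by dynamic
--     programming on the bit length m: an m-bit mask with i bits set is an
--     (m-1)-bit mask with i bits set, or an (m-1)-bit mask with i-1 bits set
--     plus the new top bit."""
--     rows = [[0]] + [[] for _ in range(j)]  # rows[i] = masks of m bits with i bits set
--     for m in range(1, n + 1):
--         top = 1 << (m - 1)
--         rows = [[0]] + [rows[i] + [x + top for x in rows[i - 1]] for i in range(1, j + 1)]
--     return rows[j]
--
--
-- def all_subsets_of_size_k(n, k):
--     """Generate all bitmasks of n bits with exactly k bits set (DP on bit length)."""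
--     if k == 0:
--         yield 0
--         return
--     if k > n:
--         return
--     if k == n:
--         yield (1 << n) - 1
--         return
--     if 2 * k <= n:
--         yield from _by_count(n, k)
--     else:
--         # complement: masks with k ones are full - (mask with n-k ones), in reverse order
--         full = (1 << n) - 1
--         for x in reversed(_by_count(n, n - k)):
--             yield full - x
-- ===== Notes on version B (the rewrite author's own statement) =====
-- stated objective: alternative
-- what changed: Replaces Gosper's bit-trick successor loop (mask & -mask, carry, shift/divide) by dynamic programming on the bit length (masks of m bits with i bits set = those of m-1 bits, plus those with i-1 bits and the new top bit), using the complement full-x in reverse when k > n/2; the k == 0 early yield is kept.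
import Mathlib
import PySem

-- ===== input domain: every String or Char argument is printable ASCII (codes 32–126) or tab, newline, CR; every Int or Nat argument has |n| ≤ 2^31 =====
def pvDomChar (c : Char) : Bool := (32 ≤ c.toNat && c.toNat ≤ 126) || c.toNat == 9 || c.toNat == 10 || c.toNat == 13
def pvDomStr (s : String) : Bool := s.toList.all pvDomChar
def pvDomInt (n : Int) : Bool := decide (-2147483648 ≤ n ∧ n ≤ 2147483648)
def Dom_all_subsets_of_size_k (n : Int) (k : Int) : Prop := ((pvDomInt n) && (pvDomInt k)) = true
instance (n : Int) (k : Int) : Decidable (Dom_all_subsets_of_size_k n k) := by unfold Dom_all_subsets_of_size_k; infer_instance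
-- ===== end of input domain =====

-- B replaces Gosper's bit-trick successor loop by dynamic programming on the bit
-- length (masks of m bits with i bits set come from masks of m-1 bits), with a
-- complement trick for k > n/2 (objective: alternative; comparable cost).
-- The generators are compared as the lists they yield.

-- ===== PORT A =====
-- Gosper's-hack successor step: c = mask & -mask; r = mask + c; (((r ^ mask) >> 2) // c) | r
def gosStep (mask : Int) : Int :=
  let c := PySem.Int.band mask (-mask)
  let r := mask + c
  PySem.Int.bor (PySem.Int.floordiv ((PySem.Int.bxor r mask) >>> (2 : Nat)) c) r

-- the `while mask < limit` loop, with fuel (fuel is sufficient on Pre_: mask strictly grows)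
def gosLoop : Nat → Int → Int → List Int
  | 0, _, _ => []
  | fuel + 1, mask, limit =>
    if mask < limit then mask :: gosLoop fuel (gosStep mask) limit else []

def all_subsets_of_size_k (n : Int) (k : Int) : List Int :=
  if k = 0 then [0]
  else
    -- `1 << k` / `1 << n`: Python raises for a negative shift count, so k.toNat / n.toNat
    -- is exact on Pre_ (there 0 < k and 0 ≤ n)
    let mask : Int := (1 <<< k.toNat) - 1
    let limit : Int := 1 <<< n.toNat
    gosLoop ((limit - mask).toNat + 1) mask limit

-- ===== PORT B =====
-- ascending n-bit masks with j bits set, DP on the bit length m (rows[i] = masks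
-- of m bits with i bits set); `rows[i]` reads/writes are exact: 0 <= i < len(rows)
def by_count (n : Int) (j : Int) : List Int :=
  let rows0 : List (List Int) := [[0]] ++ List.replicate j.toNat []
  let rows :=
    (PySem.List.pyRange 1 (n + 1) 1).foldl
      (fun rows m =>
        let top : Int := 1 <<< (m - 1).toNat  -- `1 << (m - 1)`: m ≥ 1 on this range
        (PySem.List.pyRange j 0 (-1)).foldl
          (fun rows i =>
            rows.set i.toNat
              (PySem.List.pyGetD rows i [] ++
                (PySem.List.pyGetD rows (i - 1) []).map (fun x => x + top)))
          rows)
      rows0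
  PySem.List.pyGetD rows j []

def all_subsets_of_size_k_alt (n : Int) (k : Int) : List Int :=
  if k = 0 then [0]
  else if k > n then []
  else if k = n then [(1 <<< n.toNat) - 1]  -- `(1 << n) - 1`: 0 ≤ n here
  else if 2 * k ≤ n then by_count n k
  else
    -- complement: masks with k ones are full - (mask with n-k ones), reversed
    let full : Int := (1 <<< n.toNat) - 1
    ((by_count n (n - k)).reverse).map (fun x => full - x)

-- ===== PRECONDITION & SPEC =====
-- Pre_ excludes exactly the inputs where Python A raises ValueError (a negative shift count:
-- k < 0, or k > 0 with n < 0); A returns normally everywhere else.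
def Pre_all_subsets_of_size_k (n : Int) (k : Int) : Prop := k = 0 ∨ (0 < k ∧ 0 ≤ n)
instance (n : Int) (k : Int) : Decidable (Pre_all_subsets_of_size_k n k) := by
  unfold Pre_all_subsets_of_size_k; infer_instance

def pvWitness_all_subsets_of_size_k : Int × Int := (4, 2)

def Spec_all_subsets_of_size_k (n : Int) (k : Int) (out : List Int) : Prop :=
  out = all_subsets_of_size_k_alt n k
instance (n : Int) (k : Int) (out : List Int) : Decidable (Spec_all_subsets_of_size_k n k out) := by
  unfold Spec_all_subsets_of_size_k; infer_instance

-- ===== CLAIM (what is proved, stated in full; the proofs are below) =====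
def Claim_equal_all_subsets_of_size_k : Prop :=
  ∀ (n : Int) (k : Int), Dom_all_subsets_of_size_k n k → Pre_all_subsets_of_size_k n k →
    Spec_all_subsets_of_size_k n k (all_subsets_of_size_k n k)

-- ===== LEMMAS AND PROOFS =====

-- popcount on Nat (proof-side mirror of PySem.Int.bitCount on nonnegatives)
def popc : Nat → Nat
  | 0 => 0
  | m + 1 => (m + 1) % 2 + popc ((m + 1) / 2)
decreasing_by exact Nat.div_lt_self (Nat.succ_pos m) one_lt_two

theorem popc_pos_eq (m : Nat) (h : 0 < m) : popc m = m % 2 + popc (m / 2) := by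
  cases m with
  | zero => omega
  | succ m => rw [popc]

theorem popc_double (a : Nat) (e : Nat) (he : e < 2) : popc (2 * a + e) = popc a + e := by
  rcases Nat.eq_zero_or_pos (2 * a + e) with h | h
  · have ha : a = 0 := by omega
    have he0 : e = 0 := by omega
    simp [ha, he0, popc]
  · rw [popc_pos_eq _ h]
    have h1 : (2 * a + e) % 2 = e := by omega
    have h2 : (2 * a + e) / 2 = a := by omega
    rw [h1, h2]; omega

theorem popc_split (a : Nat) : ∀ (s : Nat) (r : Nat), r < 2 ^ s →
    popc (a * 2 ^ s + r) = popc a + popc r := by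
  intro s
  induction s with
  | zero => intro r hr; interval_cases r <;> simp [popc]
  | succ s ih =>
    intro r hr
    have h1 : a * 2 ^ (s + 1) + r = 2 * (a * 2 ^ s + r / 2) + r % 2 := by
      rw [pow_succ, ← mul_assoc]; omega
    rw [h1, popc_double _ _ (Nat.mod_lt _ two_pos),
      ih (r / 2) (by rw [pow_succ] at hr; omega)]
    have h2 : popc r = popc (r / 2) + r % 2 := by
      have := popc_double (r / 2) (r % 2) (Nat.mod_lt _ two_pos)
      rw [show 2 * (r / 2) + r % 2 = r by omega] at this
      omega
    omega

theorem popc_pow_sub_one (b : Nat) : popc (2 ^ b - 1) = b := by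
  induction b with
  | zero => simp [popc]
  | succ b ih =>
    have h : 2 ^ (b + 1) - 1 = 2 * (2 ^ b - 1) + 1 := by
      have := Nat.one_le_two_pow (n := b); rw [pow_succ]; omega
    rw [h, popc_double _ _ one_lt_two, ih]

theorem two_pow_popc_le (w : Nat) : 2 ^ popc w ≤ w + 1 := by
  induction w using Nat.strong_induction_on with
  | _ w ih =>
    rcases Nat.eq_zero_or_pos w with h | h
    · subst h; simp [popc]
    · have ihh := ih (w / 2) (Nat.div_lt_self h one_lt_two)
      have hrec : popc w = popc (w / 2) + w % 2 := by
        conv_lhs => rw [show w = 2 * (w / 2) + w % 2 by omega]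
        exact popc_double _ _ (Nat.mod_lt _ two_pos)
      rw [hrec, pow_add]
      rcases Nat.mod_two_eq_zero_or_one w with h2 | h2 <;> rw [h2]
      · rw [pow_zero]; omega
      · rw [pow_one]; omega

theorem popc_le_of_lt (w s : Nat) (h : w < 2 ^ s) : popc w ≤ s := by
  by_contra hc
  have h1 : 2 ^ (s + 1) ≤ 2 ^ popc w := Nat.pow_le_pow_right two_pos (by omega)
  have h2 := two_pow_popc_le w
  have h3 : 2 ^ s < 2 ^ (s + 1) := Nat.pow_lt_pow_right one_lt_two (by omega)
  omega

theorem popc_max : ∀ (s w : Nat), w < 2 ^ s →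
    w ≤ (2 ^ popc w - 1) * 2 ^ (s - popc w) := by
  intro s
  induction s with
  | zero => intro w hw; interval_cases w; simp [popc]
  | succ s ih =>
    intro w hw
    rcases Nat.eq_zero_or_pos w with h | h
    · simp [h]
    · have hq : w / 2 < 2 ^ s := by rw [pow_succ] at hw; omega
      have ihh := ih (w / 2) hq
      have hple : popc (w / 2) ≤ s := popc_le_of_lt _ _ hq
      have hw2 : w = 2 * (w / 2) + w % 2 := by omega
      rw [hw2, popc_double _ _ (Nat.mod_lt _ two_pos)]
      rcases Nat.mod_two_eq_zero_or_one w with h2 | h2 <;> rw [h2]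
      · simp only [Nat.add_zero]
        have e1 : s + 1 - popc (w / 2) = (s - popc (w / 2)) + 1 := by omega
        rw [e1, pow_succ, ← mul_assoc]
        omega
      · have e1 : s + 1 - (popc (w / 2) + 1) = s - popc (w / 2) := by omega
        rw [e1]
        have h3 : (1 : Nat) ≤ 2 ^ popc (w / 2) := Nat.one_le_two_pow
        have h4 : (1 : Nat) ≤ 2 ^ (s - popc (w / 2)) := Nat.one_le_two_pow
        have e2 : (2 ^ (popc (w / 2) + 1) - 1) * 2 ^ (s - popc (w / 2)) =
            2 * ((2 ^ popc (w / 2) - 1) * 2 ^ (s - popc (w / 2))) + 2 ^ (s - popc (w / 2)) := by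
          rw [pow_succ, show 2 ^ popc (w / 2) * 2 - 1 = 2 * (2 ^ popc (w / 2) - 1) + 1 by omega]
          ring
        rw [e2]
        omega

-- canonical form of a positive number: even prefix u, a block of b ones, t trailing zeros
theorem exists_canon (M : Nat) (h : 0 < M) :
    ∃ u b t, u % 2 = 0 ∧ 0 < b ∧ M = u * 2 ^ (t + b) + (2 ^ b - 1) * 2 ^ t := by
  induction M using Nat.strong_induction_on with
  | _ M ih =>
    rcases Nat.mod_two_eq_zero_or_one M with hpar | hpar
    · -- even: M = 2q, q > 0
      have hq : 0 < M / 2 := by omega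
      obtain ⟨u, b, t, hu, hb, he⟩ := ih (M / 2) (Nat.div_lt_self h one_lt_two) hq
      refine ⟨u, b, t + 1, hu, hb, ?_⟩
      have h2 : M = 2 * (M / 2) := by omega
      rw [h2, he, show t + 1 + b = (t + b) + 1 by omega, pow_succ, pow_succ]
      ring
    · -- odd: M = 2q + 1
      rcases Nat.mod_two_eq_zero_or_one (M / 2) with hqq | hqq
      · -- q even (possibly 0): (q, 1, 0)
        refine ⟨M / 2, 1, 0, hqq, one_pos, ?_⟩
        simp only [Nat.zero_add, pow_one, pow_zero]
        omega
      · -- q odd: canon of q has t = 0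
        have hq : 0 < M / 2 := by omega
        obtain ⟨u, b, t, hu, hb, he⟩ := ih (M / 2) (Nat.div_lt_self h one_lt_two) hq
        have ht : t = 0 := by
          by_contra ht
          have h2 : 2 ∣ 2 ^ t := dvd_pow_self 2 ht
          have h3 : 2 ∣ 2 ^ (t + b) := dvd_pow_self 2 (by omega)
          have : M / 2 % 2 = 0 := by
            obtain ⟨x, hx⟩ := h2; obtain ⟨y, hy⟩ := h3
            rw [he, hx, hy, show u * (2 * y) + (2 ^ b - 1) * (2 * x) =
              2 * (u * y + (2 ^ b - 1) * x) from by ring]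
            omega
          omega
        subst ht
        refine ⟨u, b + 1, 0, hu, by omega, ?_⟩
        have h1 : (1 : Nat) ≤ 2 ^ b := Nat.one_le_two_pow
        have hM : M = 2 * (M / 2) + 1 := by omega
        rw [hM, he]
        simp only [Nat.zero_add, pow_succ, pow_zero]
        have h4 : (1 : Nat) ≤ 2 ^ b := Nat.one_le_two_pow
        have h5 : u * (2 ^ b * 2) = 2 * (u * 2 ^ b) := by ring
        rw [h5]
        omega

-- ------- Nat bit-level lemmas for the Gosper step -------

theorem tb_split (a s r i : Nat) (hr : r < 2 ^ s) :
    (a * 2 ^ s + r).testBit i = if i < s then r.testBit i else a.testBit (i - s) := by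
  induction s generalizing r i a with
  | zero =>
    interval_cases r
    simp
  | succ s ih =>
    have hx : a * 2 ^ (s + 1) + r = 2 * (a * 2 ^ s + r / 2) + r % 2 := by
      rw [pow_succ, ← mul_assoc]; omega
    cases i with
    | zero =>
      simp only [Nat.testBit_zero, hx]
      have : (2 * (a * 2 ^ s + r / 2) + r % 2) % 2 = r % 2 := by omega
      rw [this]
      simp
    | succ i =>
      rw [hx, Nat.testBit_add_one, Nat.testBit_add_one,
        show (2 * (a * 2 ^ s + r / 2) + r % 2) / 2 = a * 2 ^ s + r / 2 by omega,
        ih a (r / 2) i (by rw [pow_succ] at hr; omega)]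
      by_cases h : i < s
      · simp [h, Nat.lt_succ_of_lt h, show i + 1 < s + 1 from by omega]
      · simp [h, show ¬(i + 1 < s + 1) from by omega, show i + 1 - (s + 1) = i - s by omega]

theorem tb_even_succ (u j : Nat) (hu : u % 2 = 0) :
    (u + 1).testBit j = if j = 0 then true else u.testBit j := by
  cases j with
  | zero => simp [Nat.testBit_zero]; omega
  | succ j =>
    rw [Nat.testBit_add_one, Nat.testBit_add_one, show (u + 1) / 2 = u / 2 by omega]
    simp

theorem odd_and_pred (v : Nat) (hv : v % 2 = 1) : v &&& (v - 1) = v - 1 := by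
  apply Nat.eq_of_testBit_eq
  intro i
  rw [Nat.testBit_and]
  cases i with
  | zero =>
    simp only [Nat.testBit_zero]
    have : (v - 1) % 2 = 0 := by omega
    simp [this]
  | succ i =>
    rw [Nat.testBit_add_one, Nat.testBit_add_one, show v / 2 = (v - 1) / 2 by omega]
    cases ((v - 1) / 2).testBit i <;> simp

theorem and_double (a b e : Nat) (he : e < 2) : (2 * a) &&& (2 * b + e) = 2 * (a &&& b) := by
  apply Nat.eq_of_testBit_eq
  intro i
  rw [Nat.testBit_and]
  cases i with
  | zero =>
    simp only [Nat.testBit_zero]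
    simp [show (2 * a) % 2 = 0 from by omega, show (2 * (a &&& b)) % 2 = 0 from by omega]
  | succ i =>
    rw [Nat.testBit_add_one, Nat.testBit_add_one, Nat.testBit_add_one,
      show 2 * a / 2 = a by omega, show (2 * b + e) / 2 = b by omega,
      show 2 * (a &&& b) / 2 = a &&& b by omega, Nat.testBit_and]

theorem and_pred_mul (v : Nat) (hv : v % 2 = 1) :
    ∀ t, (v * 2 ^ t) &&& (v * 2 ^ t - 1) = (v - 1) * 2 ^ t := by
  intro t
  induction t with
  | zero => simpa using odd_and_pred v hv
  | succ t ih =>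
    have hv1 : 0 < v := by omega
    have h1 : 0 < v * 2 ^ t := by positivity
    have h2 : v * 2 ^ (t + 1) = 2 * (v * 2 ^ t) := by rw [pow_succ]; ring
    have h3 : v * 2 ^ (t + 1) - 1 = 2 * (v * 2 ^ t - 1) + 1 := by
      rw [pow_succ, ← mul_assoc]; omega
    rw [h3, h2, and_double _ _ _ one_lt_two, ih]
    rw [pow_succ]; ring

theorem pow_sub_one_mul_lt (b t : Nat) : (2 ^ b - 1) * 2 ^ t < 2 ^ (t + b) := by
  rw [pow_add, Nat.sub_mul, one_mul]
  have h1 : 2 ^ b * 2 ^ t = 2 ^ t * 2 ^ b := by ring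
  have h2 : 0 < 2 ^ t := Nat.two_pow_pos t
  have h3 : 0 < 2 ^ b * 2 ^ t := by positivity
  omega

-- ------- the Gosper step computed on the canonical form -------

theorem gosStep_canon (u b t : Nat) (hu : u % 2 = 0) (hb : 0 < b) :
    gosStep ((u * 2 ^ (t + b) + (2 ^ b - 1) * 2 ^ t : Nat) : Int) =
      (((u + 1) * 2 ^ (t + b) + (2 ^ (b - 1) - 1) : Nat) : Int) := by
  have hpow1 : (1 : Nat) ≤ 2 ^ b := Nat.one_le_two_pow
  set v : Nat := u * 2 ^ b + (2 ^ b - 1) with hv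
  have hvodd : v % 2 = 1 := by
    have hd : 2 ∣ 2 ^ b := dvd_pow_self 2 (by omega)
    obtain ⟨x, hx⟩ := hd
    have hx1 : 1 ≤ x := by
      have : (2:Nat) ^ 1 ≤ 2 ^ b := Nat.pow_le_pow_right two_pos hb
      omega
    simp only [hv, hx]
    rw [show u * (2 * x) = 2 * (u * x) from by ring]
    omega
  have hM : u * 2 ^ (t + b) + (2 ^ b - 1) * 2 ^ t = v * 2 ^ t := by
    simp only [hv]; rw [pow_add]; ring
  have hv1 : 0 < v := by omega
  have hMpos : 0 < v * 2 ^ t := by positivity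
  rw [hM]
  simp only [gosStep]
  -- c = mask & -mask = 2^t
  have hc : PySem.Int.band ((v * 2 ^ t : Nat) : Int) (-((v * 2 ^ t : Nat) : Int)) =
      ((2 ^ t : Nat) : Int) := by
    unfold PySem.Int.band
    have hnn : (0 : Int) ≤ ((v * 2 ^ t : Nat) : Int) := Int.natCast_nonneg _
    have hneg : ¬ (0 : Int) ≤ -((v * 2 ^ t : Nat) : Int) := by
      simp only [neg_nonneg]
      exact fun hle => absurd (le_antisymm hle (Int.natCast_nonneg _)) (by exact_mod_cast hMpos.ne')
    rw [if_pos hnn, if_neg hneg]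
    have h1 : (-(-((v * 2 ^ t : Nat) : Int)) - 1).toNat = v * 2 ^ t - 1 := by
      rw [neg_neg]; omega
    have h2 : (((v * 2 ^ t : Nat) : Int)).toNat = v * 2 ^ t := Int.toNat_natCast _
    rw [h1, h2, and_pred_mul v hvodd t]
    have h3 : v * 2 ^ t - (v - 1) * 2 ^ t = 2 ^ t := by
      rw [← Nat.sub_mul, show v - (v - 1) = 1 from by omega, one_mul]
    rw [h3]
  rw [hc]
  -- r = mask + c = (u+1) * 2^(t+b)
  have hnat : v * 2 ^ t + 2 ^ t = (u + 1) * 2 ^ (t + b) := by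
    have e : v + 1 = (u + 1) * 2 ^ b := by
      have e2 : (u + 1) * 2 ^ b = u * 2 ^ b + 2 ^ b := by ring
      simp only [hv]; omega
    calc v * 2 ^ t + 2 ^ t = (v + 1) * 2 ^ t := by ring
      _ = ((u + 1) * 2 ^ b) * 2 ^ t := by rw [e]
      _ = (u + 1) * 2 ^ (t + b) := by rw [pow_add]; ring
  have hr : ((v * 2 ^ t : Nat) : Int) + ((2 ^ t : Nat) : Int) =
      (((u + 1) * 2 ^ (t + b) : Nat) : Int) := by
    rw [← Nat.cast_add, hnat]
  rw [hr]
  -- r ^ mask = (2^(b+1) - 1) * 2^t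
  have hxor : PySem.Int.bxor (((u + 1) * 2 ^ (t + b) : Nat) : Int) ((v * 2 ^ t : Nat) : Int) =
      (((2 ^ (b + 1) - 1) * 2 ^ t : Nat) : Int) := by
    rw [PySem.Int.bxor_natCast]
    congr 1
    apply Nat.eq_of_testBit_eq
    intro i
    rw [Nat.testBit_xor, ← hM]
    have e1 : (u + 1) * 2 ^ (t + b) = (u + 1) * 2 ^ (t + b) + 0 := by omega
    have e2 : (2 ^ (b + 1) - 1) * 2 ^ t = 1 * 2 ^ (t + b) + (2 ^ b - 1) * 2 ^ t := by
      have hB : (2:Nat) ^ (b + 1) = 2 ^ b + 2 ^ b := by rw [pow_succ]; ring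
      have hTB : (2:Nat) ^ (t + b) = 2 ^ t * 2 ^ b := pow_add 2 t b
      rw [Nat.sub_mul, Nat.sub_mul, one_mul, one_mul, hB, hTB, Nat.add_mul]
      have hXY : (2:Nat) ^ b * 2 ^ t = 2 ^ t * 2 ^ b := by ring
      have h2 : 2 ^ t ≤ 2 ^ b * 2 ^ t := Nat.le_mul_of_pos_left _ (Nat.two_pow_pos b)
      omega
    have hlt : (2 ^ b - 1) * 2 ^ t < 2 ^ (t + b) := pow_sub_one_mul_lt b t
    rw [e1, e2, tb_split _ _ _ _ (Nat.two_pow_pos (t + b)),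
      tb_split _ _ _ _ hlt, tb_split _ _ _ _ hlt]
    by_cases h : i < t + b
    · simp [h]
    · simp only [h, if_false]
      rw [tb_even_succ u _ hu]
      by_cases h0 : i - (t + b) = 0
      · simp only [h0, if_true, Nat.testBit_zero]
        simp [hu]
      · simp only [h0, if_false]
        have hone : (1 : Nat).testBit (i - (t + b)) = false := by
          rw [show (1 : Nat) = 2 ^ 0 by rfl, Nat.testBit_two_pow]
          simp [Ne.symm h0]
        rw [hone]
        cases u.testBit (i - (t + b)) <;> simp
  rw [hxor]
  -- (xor >> 2) // c = 2^(b-1) - 1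
  have hshift : ((((2 ^ (b + 1) - 1) * 2 ^ t : Nat) : Int) >>> (2 : Nat)) =
      (((2 ^ (b + 1) - 1) * 2 ^ t / 4 : Nat) : Int) := by
    rw [show ((((2 ^ (b + 1) - 1) * 2 ^ t : Nat) : Int) >>> (2 : Nat)) =
      ((((2 ^ (b + 1) - 1) * 2 ^ t) >>> 2 : Nat) : Int) from rfl,
      Nat.shiftRight_eq_div_pow]
  rw [hshift, PySem.Int.floordiv_natCast]
  have hdiv : (2 ^ (b + 1) - 1) * 2 ^ t / 4 / 2 ^ t = 2 ^ (b - 1) - 1 := by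
    rw [Nat.div_div_eq_div_mul, show (4 : Nat) * 2 ^ t = 2 ^ t * 4 by ring,
      ← Nat.div_div_eq_div_mul, Nat.mul_div_cancel _ (Nat.two_pow_pos t)]
    have e : 2 ^ (b + 1) = 2 ^ (b - 1) * 4 := by
      rw [show b + 1 = (b - 1) + 2 by omega, pow_add]; ring
    have h1 : (1:Nat) ≤ 2 ^ (b - 1) := Nat.one_le_two_pow
    omega
  rw [hdiv, PySem.Int.bor_natCast]
  congr 1
  -- (2^(b-1)-1) | r = r + (2^(b-1)-1)
  apply Nat.eq_of_testBit_eq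
  intro i
  rw [Nat.testBit_or]
  have hlt2 : 2 ^ (b - 1) - 1 < 2 ^ (t + b) := by
    have h1 : 2 ^ (b - 1) ≤ 2 ^ (t + b) := Nat.pow_le_pow_right two_pos (by omega)
    have h2 : (0:Nat) < 2 ^ (b - 1) := Nat.two_pow_pos _
    omega
  rw [tb_split (u + 1) (t + b) (2 ^ (b - 1) - 1) i hlt2]
  by_cases h : i < t + b
  · have e1 : (u + 1) * 2 ^ (t + b) = (u + 1) * 2 ^ (t + b) + 0 := by omega
    conv_lhs => rw [e1]
    rw [tb_split _ _ _ _ (Nat.two_pow_pos (t + b))]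
    simp [h]
  · have hfb : (2 ^ (b - 1) - 1).testBit i = false := by
      apply Nat.testBit_eq_false_of_lt
      have h1 : 2 ^ (b - 1) ≤ 2 ^ i := Nat.pow_le_pow_right two_pos (by omega)
      have h2 : (0:Nat) < 2 ^ (b - 1) := Nat.two_pow_pos _
      omega
    have e1 : (u + 1) * 2 ^ (t + b) = (u + 1) * 2 ^ (t + b) + 0 := by omega
    conv_lhs => rw [e1]
    rw [tb_split _ _ _ _ (Nat.two_pow_pos (t + b))]
    simp [h, hfb]

-- properties of the canonical successor N = (u+1)·2^(t+b) + (2^(b-1)−1)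
theorem canon_lt_next (u b t : Nat) (hb : 0 < b) :
    u * 2 ^ (t + b) + (2 ^ b - 1) * 2 ^ t < (u + 1) * 2 ^ (t + b) + (2 ^ (b - 1) - 1) := by
  have h := pow_sub_one_mul_lt b t
  have e : (u + 1) * 2 ^ (t + b) = u * 2 ^ (t + b) + 2 ^ (t + b) := by ring
  omega

theorem popc_next (u b t : Nat) (hu : u % 2 = 0) (hb : 0 < b) :
    popc ((u + 1) * 2 ^ (t + b) + (2 ^ (b - 1) - 1)) =
      popc (u * 2 ^ (t + b) + (2 ^ b - 1) * 2 ^ t) := by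
  have hlt1 : 2 ^ (b - 1) - 1 < 2 ^ (t + b) := by
    have h1 : 2 ^ (b - 1) ≤ 2 ^ (t + b) := Nat.pow_le_pow_right two_pos (by omega)
    have h2 : (0:Nat) < 2 ^ (b - 1) := Nat.two_pow_pos _
    omega
  have hlt2 : (2 ^ b - 1) * 2 ^ t < 2 ^ (t + b) := pow_sub_one_mul_lt b t
  rw [popc_split _ _ _ hlt1, popc_split _ _ _ hlt2]
  have h1 : popc (u + 1) = popc u + 1 := by
    have h2 : u = 2 * (u / 2) := by omega
    have := popc_double (u / 2) 1 one_lt_two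
    have h3 := popc_double (u / 2) 0 two_pos
    rw [show 2 * (u / 2) + 1 = u + 1 by omega] at this
    rw [show 2 * (u / 2) + 0 = u by omega] at h3
    omega
  have h2 : popc ((2 ^ b - 1) * 2 ^ t) = b := by
    have := popc_split (2 ^ b - 1) t 0 (Nat.two_pow_pos t)
    rw [Nat.add_zero] at this
    rw [this, popc_pow_sub_one]
    simp [popc]
  rw [h1, h2, popc_pow_sub_one]
  omega

theorem popc_between (u b t x : Nat) (hu : u % 2 = 0) (hb : 0 < b)
    (h1 : u * 2 ^ (t + b) + (2 ^ b - 1) * 2 ^ t < x)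
    (h2 : x < (u + 1) * 2 ^ (t + b) + (2 ^ (b - 1) - 1)) :
    popc x ≠ popc (u * 2 ^ (t + b) + (2 ^ b - 1) * 2 ^ t) := by
  have hlt2 : (2 ^ b - 1) * 2 ^ t < 2 ^ (t + b) := pow_sub_one_mul_lt b t
  have hpM : popc (u * 2 ^ (t + b) + (2 ^ b - 1) * 2 ^ t) = popc u + b := by
    rw [popc_split _ _ _ hlt2]
    have := popc_split (2 ^ b - 1) t 0 (Nat.two_pow_pos t)
    rw [Nat.add_zero] at this
    rw [this, popc_pow_sub_one]
    simp [popc]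
  rw [hpM]
  by_cases hcase : x < (u + 1) * 2 ^ (t + b)
  · -- same high part u; the low part exceeds the max b-popcount number below 2^(t+b)
    set w : Nat := x - u * 2 ^ (t + b) with hw
    have hx : x = u * 2 ^ (t + b) + w := by omega
    have hwlt : w < 2 ^ (t + b) := by
      have : (u + 1) * 2 ^ (t + b) = u * 2 ^ (t + b) + 2 ^ (t + b) := by ring
      omega
    have hwgt : (2 ^ b - 1) * 2 ^ t < w := by omega
    rw [hx, popc_split _ _ _ hwlt]
    intro hcon
    have hpw : popc w = b := by omega
    have := popc_max (t + b) w hwlt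
    rw [hpw, show t + b - b = t by omega] at this
    omega
  · -- high part u+1; the low part is below the min (b-1)-popcount number
    set w : Nat := x - (u + 1) * 2 ^ (t + b) with hw
    have hx : x = (u + 1) * 2 ^ (t + b) + w := by omega
    have hwlt : w < 2 ^ (b - 1) - 1 := by omega
    have hwlt' : w < 2 ^ (t + b) := by
      have h3 : 2 ^ (b - 1) ≤ 2 ^ (t + b) := Nat.pow_le_pow_right two_pos (by omega)
      omega
    rw [hx, popc_split _ _ _ hwlt']
    have h1' : popc (u + 1) = popc u + 1 := by
      have := popc_double (u / 2) 1 one_lt_two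
      have h3 := popc_double (u / 2) 0 two_pos
      rw [show 2 * (u / 2) + 1 = u + 1 by omega] at this
      rw [show 2 * (u / 2) + 0 = u by omega] at h3
      omega
    rw [h1']
    intro hcon
    have hpw : popc w = b - 1 := by omega
    have := two_pow_popc_le w
    rw [hpw] at this
    omega

-- ------- the filtered-range characterisation -------

def FN (a lim K : Nat) : List Nat :=
  (List.range lim).filter (fun x => decide (a ≤ x) && decide (popc x = K))

theorem FN_nil (a lim K : Nat) (h : lim ≤ a) : FN a lim K = [] := by
  unfold FN
  apply List.filter_eq_nil_iff.mpr
  intro x hx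
  have := List.mem_range.mp hx
  simp only [Bool.and_eq_true, decide_eq_true_eq]
  omega

theorem FN_cons (a K : Nat) (hK : popc a = K) :
    ∀ lim, a < lim → FN a lim K = a :: FN (a + 1) lim K := by
  intro lim
  induction lim with
  | zero => omega
  | succ lim ih =>
    intro h
    rcases Nat.lt_or_ge a lim with h2 | h2
    · have e1 := ih h2
      unfold FN at e1 ⊢
      rw [List.range_succ, List.filter_append, List.filter_append, e1]
      have hpq : (decide (a ≤ lim) && decide (popc lim = K)) =
          (decide (a + 1 ≤ lim) && decide (popc lim = K)) := by
        simp [show a ≤ lim from by omega, show a + 1 ≤ lim from by omega]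
      simp only [List.filter_cons, List.filter_nil, hpq]
      simp
    · have ha : a = lim := by omega
      subst ha
      have t1 : List.filter (fun x => decide (a ≤ x) && decide (popc x = K))
          (List.range a) = [] := by
        apply List.filter_eq_nil_iff.mpr
        intro x hx
        have := List.mem_range.mp hx
        simp only [Bool.and_eq_true, decide_eq_true_eq]
        omega
      have t2 : List.filter (fun x => decide (a + 1 ≤ x) && decide (popc x = K))
          (List.range a) = [] := by
        apply List.filter_eq_nil_iff.mpr
        intro x hx
        have := List.mem_range.mp hx
        simp only [Bool.and_eq_true, decide_eq_true_eq]
        omega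
      unfold FN
      rw [List.range_succ, List.filter_append, List.filter_append, t1, t2]
      simp [hK]

theorem FN_shift (a a' lim K : Nat) (ha : a ≤ a')
    (hgap : ∀ x, a ≤ x → x < a' → popc x ≠ K) : FN a lim K = FN a' lim K := by
  unfold FN
  apply List.filter_congr
  intro x hx
  by_cases hp : popc x = K
  · have : (a ≤ x) ↔ (a' ≤ x) := by
      constructor
      · intro hax
        by_contra hc
        exact hgap x hax (by omega) hp
      · intro h; omega
    simp [hp, this]
  · simp [hp]

-- ------- the loop lemma -------

theorem gosLoop_eq_FN : ∀ (f M K lim : Nat), popc M = K → 0 < M → lim ≤ M + f →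
    gosLoop f (M : Int) (lim : Int) = (FN M lim K).map (Nat.cast : Nat → Int) := by
  intro f
  induction f with
  | zero =>
    intro M K lim hK hM hf
    rw [FN_nil M lim K (by omega)]
    rfl
  | succ f ih =>
    intro M K lim hK hM hf
    unfold gosLoop
    by_cases h : M < lim
    · rw [if_pos (by exact_mod_cast h)]
      obtain ⟨u, b, t, hu, hb, he⟩ := exists_canon M hM
      have hstep : gosStep (M : Int) =
          (((u + 1) * 2 ^ (t + b) + (2 ^ (b - 1) - 1) : Nat) : Int) := by
        rw [he]; exact gosStep_canon u b t hu hb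
      have hMN : M < (u + 1) * 2 ^ (t + b) + (2 ^ (b - 1) - 1) := by
        rw [he]; exact canon_lt_next u b t hb
      have hpN : popc ((u + 1) * 2 ^ (t + b) + (2 ^ (b - 1) - 1)) = K := by
        rw [popc_next u b t hu hb, ← he]; exact hK
      rw [hstep, ih _ K lim hpN (by omega) (by omega), FN_cons M K hK lim h,
        FN_shift (M + 1) ((u + 1) * 2 ^ (t + b) + (2 ^ (b - 1) - 1)) lim K (by omega)
          (fun x hx1 hx2 => by
            have hbw := popc_between u b t x hu hb (by rw [← he]; omega) hx2
            rw [← he, hK] at hbw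
            exact hbw)]
      rfl
    · rw [if_neg (by exact_mod_cast h), FN_nil M lim K (by omega)]
      rfl

-- the first mask 2^K − 1 is the smallest number of popcount K
theorem FN_from_zero (lim K : Nat) (hK : 0 < K) : FN (2 ^ K - 1) lim K = FN 0 lim K := by
  unfold FN
  apply List.filter_congr
  intro x hx
  by_cases hp : popc x = K
  · have h1 := two_pow_popc_le x
    rw [hp] at h1
    simp [hp, show 2 ^ K - 1 ≤ x from by omega]
  · simp [hp]

-- ===== VERDICT (by name: the statement is the Claim_ definition above) =====
-- ------- the B side: DP rows equal the popcount filters -------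

-- masks of m bits with i bits set, as the filtered range (Nat level)
def G (m i : Nat) : List Nat :=
  (List.range (2 ^ m)).filter (fun x => decide (popc x = i))

theorem popc_zero : popc 0 = 0 := by simp [popc]

theorem G_zero_zero : G 0 0 = [0] := by
  unfold G
  rw [pow_zero, List.range_one]
  simp [popc_zero]

theorem G_zero_pos (i : Nat) (h : 0 < i) : G 0 i = [] := by
  unfold G
  rw [pow_zero, List.range_one]
  simp [popc_zero]
  omega

theorem G_top (m i : Nat) (h : m < i) : G m i = [] := by
  unfold G
  apply List.filter_eq_nil_iff.mpr
  intro x hx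
  have hx2 := List.mem_range.mp hx
  have := popc_le_of_lt x m hx2
  simp only [decide_eq_true_eq]
  omega

theorem popc_one : popc 1 = 1 := by simp [popc]

theorem popc_shift (m x : Nat) (hx : x < 2 ^ m) : popc (2 ^ m + x) = 1 + popc x := by
  have h := popc_split 1 m x hx
  rw [one_mul] at h
  rw [h, popc_one]

theorem G_succ (m i : Nat) (hi : 0 < i) :
    G (m + 1) i = G m i ++ (G m (i - 1)).map (fun x => x + 2 ^ m) := by
  unfold G
  have h2 : 2 ^ (m + 1) = 2 ^ m + 2 ^ m := by rw [pow_succ]; omega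
  rw [h2, List.range_add, List.filter_append, List.filter_map]
  congr 1
  have hpred : ∀ x ∈ List.range (2 ^ m),
      ((fun x => decide (popc x = i)) ∘ (fun y => 2 ^ m + y)) x =
        (fun x => decide (popc x = i - 1)) x := by
    intro x hx
    have hx2 := List.mem_range.mp hx
    simp only [Function.comp_apply, popc_shift m x hx2, decide_eq_decide]
    omega
  rw [List.filter_congr hpred]
  exact List.map_congr_left (fun a _ => Nat.add_comm _ _)

theorem G_succ_zero (m : Nat) : G (m + 1) 0 = G m 0 := by
  unfold G
  have h2 : 2 ^ (m + 1) = 2 ^ m + 2 ^ m := by rw [pow_succ]; omega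
  rw [h2, List.range_add, List.filter_append, List.filter_map]
  have hnil : List.filter ((fun x => decide (popc x = 0)) ∘ (fun y => 2 ^ m + y))
      (List.range (2 ^ m)) = [] := by
    apply List.filter_eq_nil_iff.mpr
    intro x hx
    have hx2 := List.mem_range.mp hx
    simp only [Function.comp_apply, popc_shift m x hx2, decide_eq_true_eq]
    omega
  rw [hnil]
  simp

theorem G_zero' (m : Nat) : G m 0 = [0] := by
  induction m with
  | zero => exact G_zero_zero
  | succ m ih => rw [G_succ_zero, ih]

-- the expected rows after m outer steps
def rowsSpec (m J : Nat) : List (List Int) :=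
  (List.range (J + 1)).map (fun i => (G m i).map (Nat.cast : Nat → Int))

theorem rowsSpec_init (J : Nat) : [[(0:Int)]] ++ List.replicate J ([] : List Int) = rowsSpec 0 J := by
  induction J with
  | zero => simp [rowsSpec, List.range_one, G_zero_zero]
  | succ J ih =>
    unfold rowsSpec
    rw [List.replicate_succ', show J + 1 + 1 = (J + 1) + 1 from rfl, List.range_succ,
      List.map_append, ← List.append_assoc]
    unfold rowsSpec at ih
    rw [← ih]
    simp [G_zero_pos (J + 1) (by omega)]

-- mixed state inside the inner (descending i) loop: indices > c already updated
def mixState (m J c : Nat) : List (List Int) :=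
  (List.range (J + 1)).map (fun i => ((if i ≤ c then G m i else G (m + 1) i)).map (Nat.cast : Nat → Int))

theorem length_mixState (m J c : Nat) : (mixState m J c).length = J + 1 := by
  simp [mixState]

theorem getD_mix (m J c i : Nat) (h : i ≤ J) :
    PySem.List.pyGetD (mixState m J c) (i : Int) [] =
      (if i ≤ c then G m i else G (m + 1) i).map (Nat.cast : Nat → Int) := by
  have hl : (mixState m J c).length = J + 1 := length_mixState m J c
  rw [PySem.List.pyGetD_eq_getElem _ _ (Int.natCast_nonneg i)
    (by rw [hl]; exact_mod_cast (by omega : i < J + 1))]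
  simp [mixState, Int.toNat_natCast]

theorem inner_step (m J c : Nat) (hc : c + 1 ≤ J) :
    (mixState m J (c + 1)).set (((c + 1 : Nat) : Int)).toNat
      (PySem.List.pyGetD (mixState m J (c + 1)) ((c + 1 : Nat) : Int) [] ++
        (PySem.List.pyGetD (mixState m J (c + 1)) (((c + 1 : Nat) : Int) - 1) []).map
          (fun x => x + ((2 ^ m : Nat) : Int))) = mixState m J c := by
  have e1 : (((c + 1 : Nat) : Int)).toNat = c + 1 := by simp
  have e2 : ((c + 1 : Nat) : Int) - 1 = ((c : Nat) : Int) := by push_cast; ring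
  rw [e1, e2, getD_mix m J (c + 1) (c + 1) hc, getD_mix m J (c + 1) c (by omega),
    if_pos (le_refl (c + 1)), if_pos (by omega : c ≤ c + 1)]
  have hmapcast : ((G m c).map (Nat.cast : Nat → Int)).map (fun x => x + ((2 ^ m : Nat) : Int)) =
      ((G m c).map (fun x => x + 2 ^ m)).map (Nat.cast : Nat → Int) := by
    rw [List.map_map, List.map_map]
    apply List.map_congr_left
    intro a _
    simp only [Function.comp_apply]
    push_cast
    ring
  rw [hmapcast, ← List.map_append]
  have hG : G m (c + 1) ++ (G m c).map (fun x => x + 2 ^ m) = G (m + 1) (c + 1) := by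
    rw [G_succ m (c + 1) (by omega)]
    norm_num
  rw [hG]
  apply List.ext_getElem
  · simp [mixState]
  · intro idx h1 h2
    rw [List.getElem_set]
    simp only [mixState, List.getElem_map, List.getElem_range]
    by_cases he : c + 1 = idx
    · rw [if_pos he, ← he, if_neg (by omega : ¬ (c + 1 ≤ c))]
    · rw [if_neg he]
      by_cases hle : idx ≤ c
      · rw [if_pos (by omega : idx ≤ c + 1), if_pos hle]
      · rw [if_neg (by omega : ¬ idx ≤ c + 1), if_neg hle]

theorem inner_fold (m J : Nat) : ∀ (c : Nat), c ≤ J →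
    (PySem.List.pyRange (c : Int) 0 (-1)).foldl
      (fun rows i =>
        rows.set i.toNat
          (PySem.List.pyGetD rows i [] ++
            (PySem.List.pyGetD rows (i - 1) []).map (fun x => x + ((2 ^ m : Nat) : Int))))
      (mixState m J c) = mixState m J 0 := by
  intro c
  induction c with
  | zero =>
    intro _
    rw [Nat.cast_zero, PySem.List.pyRange_neg_one_eq_nil le_rfl]
    rfl
  | succ c ih =>
    intro hc
    have hcons : PySem.List.pyRange ((c + 1 : Nat) : Int) 0 (-1) =
        ((c + 1 : Nat) : Int) :: PySem.List.pyRange ((c : Nat) : Int) 0 (-1) := by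
      rw [PySem.List.pyRange_neg_one_cons (by exact_mod_cast Nat.succ_pos c)]
      congr 1
      push_cast
      ring
    rw [hcons]
    simp only [List.foldl_cons]
    rw [inner_step m J c hc]
    exact ih (by omega)

theorem mixState_full (m J : Nat) : mixState m J J = rowsSpec m J := by
  unfold mixState rowsSpec
  apply List.map_congr_left
  intro i hi
  have := List.mem_range.mp hi
  rw [if_pos (by omega)]

theorem mixState_done (m J : Nat) : mixState m J 0 = rowsSpec (m + 1) J := by
  unfold mixState rowsSpec
  apply List.map_congr_left
  intro i hi
  by_cases h0 : i = 0
  · rw [h0]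
    simp [G_zero' m, G_zero' (m + 1)]
  · rw [if_neg (by omega)]

theorem outer_fold (J : Nat) : ∀ (N : Nat),
    (PySem.List.pyRange 1 ((N : Int) + 1) 1).foldl
      (fun rows m =>
        (PySem.List.pyRange (J : Int) 0 (-1)).foldl
          (fun rows i =>
            rows.set i.toNat
              (PySem.List.pyGetD rows i [] ++
                (PySem.List.pyGetD rows (i - 1) []).map (fun x => x + ((1 <<< (m - 1).toNat : Nat) : Int))))
          rows)
      (rowsSpec 0 J) = rowsSpec N J := by
  intro N
  induction N with
  | zero =>
    rw [show ((0 : Nat) : Int) + 1 = 1 by norm_num, PySem.List.pyRange_one_eq_nil le_rfl]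
    rfl
  | succ N ih =>
    have hsplit : PySem.List.pyRange 1 (((N + 1 : Nat) : Int) + 1) 1 =
        PySem.List.pyRange 1 ((N : Int) + 1) 1 ++ [(N : Int) + 1] := by
      rw [show (((N + 1 : Nat) : Int) + 1) = ((N : Int) + 1) + 1 by push_cast; ring]
      exact PySem.List.pyRange_one_succ_right (by omega)
    rw [hsplit, List.foldl_append, ih]
    simp only [List.foldl_cons, List.foldl_nil]
    have htop : ((1 <<< (((N : Int) + 1) - 1).toNat : Nat) : Int) = ((2 ^ N : Nat) : Int) := by
      rw [show ((N : Int) + 1) - 1 = (N : Int) by ring, Int.toNat_natCast,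
        Nat.shiftLeft_eq, one_mul]
    rw [htop, ← mixState_full N J]
    rw [inner_fold N J J le_rfl, mixState_done]

theorem by_count_eq (n j : Int) (hn : 0 ≤ n) (hj : 0 ≤ j) :
    by_count n j = (G n.toNat j.toNat).map (Nat.cast : Nat → Int) := by
  lift n to Nat using hn with N
  lift j to Nat using hj with J
  simp only [by_count, Int.toNat_natCast]
  rw [rowsSpec_init J, outer_fold J N]
  have hl : (rowsSpec N J).length = J + 1 := by simp [rowsSpec]
  rw [PySem.List.pyGetD_eq_getElem _ _ (Int.natCast_nonneg _)
    (by rw [hl]; exact_mod_cast (by omega : J < J + 1))]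
  simp [rowsSpec, Int.toNat_natCast]

-- complement bits: popc (2^N - 1 - x) = N - popc x
theorem popc_compl : ∀ (N x : Nat), x < 2 ^ N → popc (2 ^ N - 1 - x) = N - popc x := by
  intro N
  induction N with
  | zero =>
    intro x hx
    interval_cases x
    simp [popc_zero]
  | succ N ih =>
    intro x hx
    have h2 : 2 ^ (N + 1) = 2 * 2 ^ N := by rw [pow_succ]; omega
    have hq : x / 2 < 2 ^ N := by omega
    have hE : 2 ^ (N + 1) - 1 - x = 2 * (2 ^ N - 1 - x / 2) + (1 - x % 2) := by omega
    have hrec : popc x = popc (x / 2) + x % 2 := by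
      have h := popc_double (x / 2) (x % 2) (Nat.mod_lt _ two_pos)
      rw [show 2 * (x / 2) + x % 2 = x by omega] at h
      omega
    rw [hE, popc_double _ _ (by omega), ih (x / 2) hq]
    have := popc_le_of_lt (x / 2) N hq
    omega

theorem map_sub_range (N2 : Nat) :
    (List.range N2).map (fun x => N2 - 1 - x) = (List.range N2).reverse := by
  apply List.ext_getElem
  · simp
  · intro i h1 h2
    simp only [List.getElem_map, List.getElem_range, List.getElem_reverse,
      List.length_range]

theorem G_compl (N J : Nat) (hJ : J ≤ N) :
    ((G N J).reverse).map (fun x => 2 ^ N - 1 - x) = G N (N - J) := by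
  unfold G
  rw [← List.filter_reverse]
  have hpred : ∀ x ∈ (List.range (2 ^ N)).reverse,
      (fun x => decide (popc x = J)) x =
        ((fun x => decide (popc x = N - J)) ∘ (fun y => 2 ^ N - 1 - y)) x := by
    intro x hx
    have hx2 := List.mem_range.mp (List.mem_reverse.mp hx)
    have hle := popc_le_of_lt x N hx2
    simp only [Function.comp_apply, popc_compl N x hx2, decide_eq_decide]
    omega
  rw [List.filter_congr hpred, ← List.filter_map, List.map_reverse, map_sub_range,
    List.reverse_reverse]

-- the common normal form both ports reduce to
theorem FN_eq_G (N K : Nat) : FN 0 (2 ^ N) K = G N K := by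
  unfold FN G
  apply List.filter_congr
  intro x hx
  simp

theorem all_subsets_of_size_k_spec : Claim_equal_all_subsets_of_size_k := by
  intro n k _ hpre
  unfold Spec_all_subsets_of_size_k
  by_cases hk : k = 0
  · simp [all_subsets_of_size_k, all_subsets_of_size_k_alt, hk]
  · simp only [all_subsets_of_size_k, if_neg hk]
    have hk' : 0 < k ∧ 0 ≤ n := by
      rcases hpre with h | h
      · exact absurd h hk
      · exact h
    set K : Nat := k.toNat with hKdef
    set N : Nat := n.toNat with hNdef
    have hKpos : 0 < K := by omega
    have hone : (1:Nat) ≤ 2 ^ K := Nat.one_le_two_pow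
    have hmask : ((1 <<< K : Nat) : Int) - 1 = ((2 ^ K - 1 : Nat) : Int) := by
      rw [Nat.shiftLeft_eq, one_mul]
      omega
    have hlimit : ((1 <<< N : Nat) : Int) = ((2 ^ N : Nat) : Int) := by
      rw [Nat.shiftLeft_eq, one_mul]
    rw [hmask, hlimit]
    have hM0 : 0 < 2 ^ K - 1 := by
      have : (2:Nat) ^ 1 ≤ 2 ^ K := Nat.pow_le_pow_right two_pos hKpos
      omega
    have hfuel : 2 ^ N ≤ (2 ^ K - 1) +
        ((((2 ^ N : Nat) : Int) - ((2 ^ K - 1 : Nat) : Int)).toNat + 1) := by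
      rcases Nat.lt_or_ge (2 ^ K - 1) (2 ^ N) with h | h
      · have : (((2 ^ N : Nat) : Int) - ((2 ^ K - 1 : Nat) : Int)).toNat = 2 ^ N - (2 ^ K - 1) := by
          omega
        omega
      · omega
    rw [gosLoop_eq_FN _ _ K _ (popc_pow_sub_one K) hM0 hfuel, FN_from_zero _ K hKpos, FN_eq_G]
    -- both sides are now about G N K; discharge B's branches
    simp only [all_subsets_of_size_k_alt, if_neg hk]
    rw [← hNdef]
    by_cases hkn : k > n
    · rw [if_pos hkn, G_top N K (by omega)]
      rfl
    · rw [if_neg hkn]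
      by_cases hke : k = n
      · rw [if_pos hke]
        have hNK : K = N := by omega
        have hNpos : 0 < N := by omega
        have hsing : G N N = [2 ^ N - 1] := by
          rw [← FN_eq_G, ← FN_from_zero (2 ^ N) N (by omega),
            FN_cons (2 ^ N - 1) N (popc_pow_sub_one N) (2 ^ N)
              (by have : (1:Nat) ≤ 2 ^ N := Nat.one_le_two_pow; omega),
            show (2 ^ N - 1) + 1 = 2 ^ N by
              have : (1:Nat) ≤ 2 ^ N := Nat.one_le_two_pow; omega,
            FN_nil (2 ^ N) (2 ^ N) N le_rfl]
        rw [hNK, hsing]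
        simp only [List.map_cons, List.map_nil]
        rw [show ((1 <<< N : Nat) : Int) - 1 = ((2 ^ N - 1 : Nat) : Int) by
          rw [Nat.shiftLeft_eq, one_mul]
          have h1N : (1:Nat) ≤ 2 ^ N := Nat.one_le_two_pow
          omega]
      · rw [if_neg hke]
        by_cases hk2 : 2 * k ≤ n
        · rw [if_pos hk2, by_count_eq n k (by omega) (by omega)]
        · rw [if_neg hk2]
          have hKN : K ≤ N := by omega
          rw [by_count_eq n (n - k) (by omega) (by omega),
            show (n - k).toNat = N - K by omega]
          rw [← List.map_reverse, List.map_map]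
          have hfull : ((1 <<< N : Nat) : Int) - 1 = ((2 ^ N - 1 : Nat) : Int) := by
            rw [Nat.shiftLeft_eq, one_mul]
            have : (1:Nat) ≤ 2 ^ N := Nat.one_le_two_pow
            omega
          rw [hfull]
          have hmemmap : ((G N (N - K)).reverse).map
              ((fun x => ((2 ^ N - 1 : Nat) : Int) - x) ∘ (Nat.cast : Nat → Int)) =
                ((G N (N - K)).reverse).map ((Nat.cast : Nat → Int) ∘ (fun y => 2 ^ N - 1 - y)) := by
            apply List.map_congr_left
            intro y hy
            have hy2 : y < 2 ^ N := by
              have := List.mem_range.mp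
                ((List.mem_filter.mp (List.mem_reverse.mp hy)).1)
              exact this
            simp only [Function.comp_apply]
            omega
          rw [hmemmap, ← List.map_map, G_compl N (N - K) (by omega),
            show N - (N - K) = K by omega]
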